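-- pv_equiv track=rewrite | github.com/joaquinlemusm/Automation-Programmability | router_script.py | get_network
-- ===== SOURCE A (Python) =====
-- def get_network(ips):
--     network = []
--     for ip in ips:
--         tmp_ip = ip.split('.')
--         tmp_ip[-1] = '0'
--         network_ip = ""
--         for i in range(len(tmp_ip)):
--             network_ip += tmp_ip[i] + '.'
--         network.append(network_ip[:-1])
--     return network
-- ===== SOURCE B (Python) =====
-- def get_network(ips):
--     return [ip[:ip.rfind('.') + 1] + '0' for ip in ips]
-- ===== Notes on version B (the rewrite author's own statement) =====
-- stated objective: simpler
-- what changed: Instead of splitting each IP into octets, overwriting the last one and re-joining with an inner character loop, B finds the last dot with rfind and splices '0' after it in a single slice inside a list comprehension.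
import Mathlib
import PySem

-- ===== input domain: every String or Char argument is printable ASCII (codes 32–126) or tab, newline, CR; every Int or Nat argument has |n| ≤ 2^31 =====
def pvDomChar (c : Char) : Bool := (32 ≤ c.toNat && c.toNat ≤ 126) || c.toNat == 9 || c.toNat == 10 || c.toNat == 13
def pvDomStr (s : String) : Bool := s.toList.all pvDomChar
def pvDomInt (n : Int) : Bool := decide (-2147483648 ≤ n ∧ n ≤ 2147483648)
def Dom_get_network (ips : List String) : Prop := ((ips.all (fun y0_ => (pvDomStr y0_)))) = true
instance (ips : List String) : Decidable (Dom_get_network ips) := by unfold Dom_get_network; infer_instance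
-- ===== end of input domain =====

-- B replaces A's split-into-octets / overwrite-last / rejoin-with-inner-loop by a single
-- rfind-based slice per IP ('ip[:ip.rfind('.')+1] + '0''), collected with a list comprehension (objective: simpler).

-- ===== PORT A =====
def get_network (ips : List String) : List String :=
  ips.foldl (fun network ip =>
    let tmp_ip := PySem.Chars.splitOn ip.toList ['.']          -- ip.split('.')
    let tmp_ip2 := tmp_ip.dropLast ++ [['0']]                   -- tmp_ip[-1] = '0' (split is never empty)
    let network_ip := (PySem.List.pyRange 0 (PySem.List.len tmp_ip2)).foldl
        (fun acc i => acc ++ (PySem.List.pyGetD tmp_ip2 i [] ++ ['.'])) ([] : List Char)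
    network ++ [String.ofList (PySem.List.slice network_ip none (some (-1)))]) []

-- ===== PORT B =====
def get_network_alt (ips : List String) : List String :=
  ips.map (fun ip =>
    String.ofList (PySem.List.slice ip.toList none (some (PySem.Chars.rfind ip.toList ['.'] + 1)) ++ ['0']))

-- ===== PRECONDITION & SPEC =====
def Spec_get_network (ips : List String) (out : List String) : Prop := out = get_network_alt ips
instance (ips : List String) (out : List String) : Decidable (Spec_get_network ips out) := by unfold Spec_get_network; infer_instance

-- ===== CLAIM (what is proved, stated in full; the proofs are below) =====
def Claim_equal_get_network : Prop := ∀ (ips : List String), Dom_get_network ips → Spec_get_network ips (get_network ips)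

-- ===== LEMMAS AND PROOFS =====

-- Proof-side characterisation of s.split(sep) for a single-character separator.
def splitC (c : Char) : List Char → List (List Char)
  | [] => [[]]
  | a :: rest => if a = c then [] :: splitC c rest else (splitC c rest).modifyHead (a :: ·)

-- Proof-side '.'-join of a nonempty piece list.
def myJoin (c : Char) : List (List Char) → List Char
  | [] => []
  | [x] => x
  | x :: y :: t => x ++ c :: myJoin c (y :: t)

theorem splitC_ne_nil (c : Char) (cs : List Char) : splitC c cs ≠ [] := by
  induction cs with
  | nil => simp [splitC]
  | cons a rest ih =>
    simp only [splitC]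
    split_ifs
    · simp
    · cases h : splitC c rest with
      | nil => exact absurd h ih
      | cons p t => simp [List.modifyHead]

theorem splitC_not_mem (c : Char) (cs : List Char) (h : c ∉ cs) : splitC c cs = [cs] := by
  induction cs with
  | nil => rfl
  | cons a rest ih =>
    simp only [List.mem_cons, not_or] at h
    simp only [splitC, ih h.2, List.modifyHead]
    rw [if_neg (fun hh => h.1 hh.symm)]

theorem splitC_mem_len (c : Char) (cs : List Char) (h : c ∈ cs) : 2 ≤ (splitC c cs).length := by
  induction cs with
  | nil => simp at h
  | cons a rest ih =>
    simp only [splitC]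
    split_ifs with hac
    · have := splitC_ne_nil c rest
      cases hs : splitC c rest with
      | nil => exact absurd hs this
      | cons p t => simp
    · have hm : c ∈ rest := by
        rcases List.mem_cons.mp h with h1 | h1
        · exact absurd h1.symm hac
        · exact h1
      have := ih hm
      cases hs : splitC c rest with
      | nil => simp [hs] at this
      | cons p t => rw [hs] at this; simpa [List.modifyHead] using this

theorem splitOn_go_eq (c : Char) :
    ∀ (fuel : Nat) (l cur : List Char) (acc : List (List Char)), l.length < fuel →
      PySem.Chars.splitOn.go [c] fuel l cur acc
        = acc.reverse ++ (splitC c l).modifyHead (fun p => cur.reverse ++ p) := by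
  intro fuel
  induction fuel with
  | zero => intro l cur acc h; omega
  | succ fuel ih =>
    intro l cur acc h
    cases l with
    | nil => simp [PySem.Chars.splitOn.go, splitC, List.modifyHead]
    | cons a rest =>
      simp only [PySem.Chars.splitOn.go]
      by_cases hac : a = c
      · have hpre : List.isPrefixOf [c] (a :: rest) = true := by
          simp [List.isPrefixOf, hac]
        rw [if_pos hpre]
        have : List.drop (List.length [c]) (a :: rest) = rest := by simp
        rw [this, ih rest [] (cur.reverse :: acc) (by simpa using Nat.lt_of_succ_lt_succ h)]
        rcases hs : splitC c rest with _ | ⟨p, t⟩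
        · exact absurd hs (splitC_ne_nil c rest)
        · simp [splitC, hac, hs, List.modifyHead]
      · have hpre : List.isPrefixOf [c] (a :: rest) = false := by
          simp [List.isPrefixOf]; exact fun hca => absurd hca.symm hac
        rw [if_neg (by simp [hpre])]
        rw [ih rest (a :: cur) acc (by simpa using Nat.lt_of_succ_lt_succ h)]
        rcases hs : splitC c rest with _ | ⟨p, t⟩
        · exact absurd hs (splitC_ne_nil c rest)
        · simp [splitC, hac, hs, List.modifyHead]

theorem splitOn_eq_splitC (c : Char) (cs : List Char) :
    PySem.Chars.splitOn cs [c] = splitC c cs := by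
  have h := splitOn_go_eq c (cs.length + 1) cs [] [] (by omega)
  rcases hs : splitC c cs with _ | ⟨p, t⟩
  · exact absurd hs (splitC_ne_nil c cs)
  · rw [hs] at h
    simpa [PySem.Chars.splitOn, List.modifyHead, hs] using h

theorem rfind_go_cons (c a : Char) (rest : List Char) :
    ∀ j : Nat, PySem.Chars.rfind.go (a :: rest) [c] (j + 1)
      = (if PySem.Chars.rfind.go rest [c] j = -1 then (if a = c then (0 : Int) else -1)
         else PySem.Chars.rfind.go rest [c] j + 1) := by
  intro j
  induction j with
  | zero =>
    simp only [PySem.Chars.rfind.go]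
    by_cases hp : [c] <+: rest
    · simp [List.drop, hp]
    · by_cases hac : a = c
      · subst hac
        simp [List.drop, hp]
      · have hca : ¬ c = a := fun hh => hac hh.symm
        simp [List.drop, hp, List.cons_prefix_cons, hca, hac]
  | succ j ih =>
    have hstep : PySem.Chars.rfind.go (a :: rest) [c] (j + 1 + 1)
        = if List.isPrefixOf [c] (List.drop (j + 1 + 1) (a :: rest)) = true then ((j : Int) + 1 + 1)
          else PySem.Chars.rfind.go (a :: rest) [c] (j + 1) := by
      simp only [PySem.Chars.rfind.go]
      push_cast; ring_nf
    have hstep' : PySem.Chars.rfind.go rest [c] (j + 1)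
        = if List.isPrefixOf [c] (List.drop (j + 1) rest) = true then ((j : Int) + 1)
          else PySem.Chars.rfind.go rest [c] j := by
      simp only [PySem.Chars.rfind.go]
      push_cast; ring_nf
    have hdrop : List.drop (j + 1 + 1) (a :: rest) = List.drop (j + 1) rest := by
      simp [List.drop]
    rw [hstep, hdrop, hstep']
    by_cases hp : List.isPrefixOf [c] (List.drop (j + 1) rest) = true
    · rw [if_pos hp, if_pos hp, if_neg (by omega)]
    · have hp' : ¬ (List.isPrefixOf [c] (List.drop (j + 1) rest) = true) := hp
      rw [if_neg hp', if_neg hp', ih]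

theorem rfind_nil (c : Char) : PySem.Chars.rfind [] [c] = -1 := by
  simp [PySem.Chars.rfind, PySem.Chars.rfind.go, List.isPrefixOf]

theorem rfind_cons (c a : Char) (rest : List Char) :
    PySem.Chars.rfind (a :: rest) [c]
      = (if PySem.Chars.rfind rest [c] = -1 then (if a = c then (0 : Int) else -1)
         else PySem.Chars.rfind rest [c] + 1) := by
  show PySem.Chars.rfind.go (a :: rest) [c] (rest.length + 1) = _
  exact rfind_go_cons c a rest rest.length

theorem rfind_ge (c : Char) (cs : List Char) : -1 ≤ PySem.Chars.rfind cs [c] := by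
  induction cs with
  | nil => rw [rfind_nil]
  | cons a rest ih =>
    rw [rfind_cons]
    split_ifs <;> omega

theorem rfind_neg1_iff (c : Char) (cs : List Char) :
    PySem.Chars.rfind cs [c] = -1 ↔ c ∉ cs := by
  induction cs with
  | nil => simp [rfind_nil]
  | cons a rest ih =>
    rw [rfind_cons]
    by_cases h1 : PySem.Chars.rfind rest [c] = -1
    · rw [if_pos h1]
      by_cases hac : a = c
      · simp [hac]
      · have hca : ¬ c = a := fun hh => hac hh.symm
        simp [hac, hca, ih.mp h1]
    · rw [if_neg h1]
      have := rfind_ge c rest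
      constructor
      · intro h; omega
      · intro h
        simp only [List.mem_cons, not_or] at h
        exact absurd (ih.mpr h.2) h1

theorem flatten_map_ne_nil (c : Char) (x : List Char) (t : List (List Char)) :
    (List.map (fun p => p ++ [c]) (x :: t)).flatten ≠ [] := by
  simp

theorem dropLast_flatten_eq_myJoin (c : Char) :
    ∀ (l : List (List Char)), l ≠ [] →
      ((l.map (fun p => p ++ [c])).flatten).dropLast = myJoin c l := by
  intro l
  induction l with
  | nil => intro h; exact absurd rfl h
  | cons x t ih =>
    intro _
    cases t with
    | nil => simp [myJoin]
    | cons y u =>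
      have hne := flatten_map_ne_nil c y u
      calc ((List.map (fun p => p ++ [c]) (x :: y :: u)).flatten).dropLast
          = ((x ++ [c]) ++ (List.map (fun p => p ++ [c]) (y :: u)).flatten).dropLast := by
            simp
        _ = (x ++ [c]) ++ ((List.map (fun p => p ++ [c]) (y :: u)).flatten).dropLast :=
            List.dropLast_append_of_ne_nil hne
        _ = (x ++ [c]) ++ myJoin c (y :: u) := by rw [ih (by simp)]
        _ = myJoin c (x :: y :: u) := by simp [myJoin]

theorem myJoin_eq_take (c : Char) :
    ∀ (cs : List Char) (z : List Char),
      myJoin c ((splitC c cs).dropLast ++ [z])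
        = List.take (PySem.Chars.rfind cs [c] + 1).toNat cs ++ z := by
  intro cs
  induction cs with
  | nil => intro z; simp [splitC, myJoin, rfind_nil]
  | cons a rest ih =>
    intro z
    by_cases hac : a = c
    · -- a = c : a new empty piece is opened
      subst hac
      have hP := splitC_ne_nil a rest
      rw [rfind_cons]
      simp only [splitC, if_true]
      rw [List.dropLast_cons_of_ne_nil hP]
      have hL : ([] :: (splitC a rest).dropLast) ++ [z]
          = [] :: ((splitC a rest).dropLast ++ [z]) := by simp
      rw [hL]
      have hjoin : myJoin a ([] :: ((splitC a rest).dropLast ++ [z]))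
          = a :: myJoin a ((splitC a rest).dropLast ++ [z]) := by
        cases hh : (splitC a rest).dropLast ++ [z] with
        | nil => simp at hh
        | cons w t => simp [myJoin]
      rw [hjoin, ih z]
      by_cases h1 : PySem.Chars.rfind rest [a] = -1
      · rw [if_pos h1, h1]
        simp
      · rw [if_neg h1]
        have := rfind_ge a rest
        have h2 : (PySem.Chars.rfind rest [a] + 1 + 1).toNat
            = (PySem.Chars.rfind rest [a] + 1).toNat + 1 := by omega
        rw [h2]
        simp
    · -- a ≠ c : a is prepended to the first piece
      by_cases hm : c ∈ rest
      · -- at least two pieces in rest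
        have hlen := splitC_mem_len c rest hm
        rcases hs : splitC c rest with _ | ⟨p, t⟩
        · exact absurd hs (splitC_ne_nil c rest)
        · cases t with
          | nil => rw [hs] at hlen; simp at hlen
          | cons q u =>
            have h1 : PySem.Chars.rfind rest [c] ≠ -1 :=
              fun h => absurd ((rfind_neg1_iff c rest).mp h) (by simpa using hm)
            have hge := rfind_ge c rest
            rw [rfind_cons, if_neg h1]
            simp only [splitC, if_neg hac, hs, List.modifyHead]
            rw [List.dropLast_cons_of_ne_nil (x := a :: p) (l := q :: u) (by simp)]
            simp only [List.cons_append]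
            have hjoin : myJoin c ((a :: p) :: ((q :: u).dropLast ++ [z]))
                = (a :: p) ++ c :: myJoin c ((q :: u).dropLast ++ [z]) := by
              cases hh : (q :: u).dropLast ++ [z] with
              | nil => simp at hh
              | cons w t' => simp [myJoin]
            rw [hjoin]
            have ih' := ih z
            rw [hs, List.dropLast_cons_of_ne_nil (x := p) (l := q :: u) (by simp)] at ih'
            simp only [List.cons_append] at ih'
            have hjoin2 : myJoin c (p :: ((q :: u).dropLast ++ [z]))
                = p ++ c :: myJoin c ((q :: u).dropLast ++ [z]) := by
              cases hh : (q :: u).dropLast ++ [z] with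
              | nil => simp at hh
              | cons w t' => simp [myJoin]
            rw [hjoin2] at ih'
            have h2 : (PySem.Chars.rfind rest [c] + 1 + 1).toNat
                = (PySem.Chars.rfind rest [c] + 1).toNat + 1 := by omega
            rw [h2]
            simp only [List.take_succ_cons, List.cons_append]
            rw [ih']
      · -- no dot at all: single piece, nothing kept
        have hall : c ∉ a :: rest := by
          simp only [List.mem_cons, not_or]
          exact ⟨fun h => absurd h.symm hac, hm⟩
        have h0 : PySem.Chars.rfind (a :: rest) [c] = -1 := (rfind_neg1_iff c (a :: rest)).mpr hall
        rw [h0]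
        simp only [splitC, if_neg hac, splitC_not_mem c rest hm, List.modifyHead]
        simp [myJoin]

theorem per_string (cs : List Char) :
    PySem.List.slice
        ((PySem.List.pyRange 0 (PySem.List.len ((PySem.Chars.splitOn cs ['.']).dropLast ++ [['0']]))).foldl
          (fun acc i => acc ++ (PySem.List.pyGetD ((PySem.Chars.splitOn cs ['.']).dropLast ++ [['0']]) i [] ++ ['.']))
          ([] : List Char))
        none (some (-1))
      = PySem.List.slice cs none (some (PySem.Chars.rfind cs ['.'] + 1)) ++ ['0'] := by
  set tmp2 := (PySem.Chars.splitOn cs ['.']).dropLast ++ [['0']] with htmp2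
  have hfold : (PySem.List.pyRange 0 (PySem.List.len tmp2)).foldl
      (fun acc i => acc ++ (PySem.List.pyGetD tmp2 i [] ++ ['.'])) ([] : List Char)
      = (tmp2.map (fun p => p ++ ['.'])).flatten := by
    rw [PySem.List.foldl_append_eq_flatMap (fun i => PySem.List.pyGetD tmp2 i [] ++ ['.'])]
    rw [List.flatMap_def]
    have : List.map (fun i => PySem.List.pyGetD tmp2 i [] ++ ['.'])
          (PySem.List.pyRange 0 (PySem.List.len tmp2))
        = List.map (fun p => p ++ ['.'])
          (List.map (fun j => PySem.List.pyGetD tmp2 j []) (PySem.List.pyRange 0 (PySem.List.len tmp2))) := by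
      rw [List.map_map]; rfl
    rw [this, PySem.List.map_pyGetD_pyRange_zero tmp2 []]
    simp
  rw [hfold, PySem.List.slice_to_neg_one]
  have hne : tmp2 ≠ [] := by simp [htmp2]
  rw [dropLast_flatten_eq_myJoin '.' tmp2 hne]
  rw [htmp2, splitOn_eq_splitC '.' cs, myJoin_eq_take '.' cs ['0']]
  rw [PySem.List.slice_to cs (by have := rfind_ge '.' cs; omega)]

-- ===== VERDICT (by name: the statement is the Claim_ definition above) =====
theorem get_network_spec : Claim_equal_get_network := by
  intro ips _
  unfold Spec_get_network get_network get_network_alt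
  rw [PySem.List.foldl_append_singleton_eq_map
    (fun ip => String.ofList (PySem.List.slice
      ((PySem.List.pyRange 0 (PySem.List.len ((PySem.Chars.splitOn ip.toList ['.']).dropLast ++ [['0']]))).foldl
        (fun acc i => acc ++ (PySem.List.pyGetD ((PySem.Chars.splitOn ip.toList ['.']).dropLast ++ [['0']]) i [] ++ ['.']))
        ([] : List Char))
      none (some (-1)))) ips []]
  simp only [List.nil_append]
  apply List.map_congr_left
  intro ip _
  exact congrArg String.ofList (per_string ip.toList)
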